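-- pv_equiv track=rewrite | github.com/NorvellArt/python-course-homeworks | homework10/task6.py | set_gen
-- ===== SOURCE A (Python) =====
-- def set_gen(lst):
--     new_list = list(set(lst))
--     new_set = set(lst)
--     count = 1
--     for i in new_list:
--         while count < lst.count(i):
--             count += 1
--             new_set.add(str(i) * count)
--         count = 1
--     return new_set
-- ===== SOURCE B (Python) =====
-- def set_gen(lst):
--     buckets = {}  # value -> its repeat-strings so far, in first-occurrence order
--     for x in lst:
--         if x in buckets:
--             buckets[x].append(str(x) * (len(buckets[x]) + 2))
--         else:
--             buckets[x] = []
--     result = set(buckets)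
--     for chunk in buckets.values():
--         result.update(chunk)
--     return result
-- ===== Notes on version B (the rewrite author's own statement) =====
-- stated objective: faster
-- what changed: One streaming pass builds, for each value, a bucket of its repeat-strings incrementally from occurrence ranks (the k-th occurrence emits str(x)*k for k>=2), then the buckets are unioned into the set of distinct elements; A's iteration over the unique values with a per-value lst.count rescan and an inner while-loop is gone.
import Mathlib
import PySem

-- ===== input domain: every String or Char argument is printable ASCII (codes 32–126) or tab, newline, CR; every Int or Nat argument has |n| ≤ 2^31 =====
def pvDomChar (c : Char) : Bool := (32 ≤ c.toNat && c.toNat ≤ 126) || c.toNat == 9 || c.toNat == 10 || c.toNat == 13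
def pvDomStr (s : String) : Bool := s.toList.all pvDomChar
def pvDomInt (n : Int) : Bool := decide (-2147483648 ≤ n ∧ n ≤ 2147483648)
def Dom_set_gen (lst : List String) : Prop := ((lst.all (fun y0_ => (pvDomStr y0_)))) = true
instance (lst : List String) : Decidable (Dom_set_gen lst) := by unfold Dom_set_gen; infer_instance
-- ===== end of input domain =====

-- B replaces A's unique-value iteration with per-value lst.count rescans and an inner while-loop
-- by one streaming pass that builds, per value, the bucket of its repeat-strings incrementally
-- from occurrence ranks (no counting, no while), then unions the buckets into the set of distinct
-- elements (objective: faster — no per-unique rescan of lst).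


-- ===== PORT A =====
-- the inner 'while count < lst.count(i): count += 1; new_set.add(str(i) * count)'
def set_gen_while (i : String) (cnt : Int) (count : Int) (s : PySem.Set String) : PySem.Set String :=
  if _h : count < cnt then
    set_gen_while i cnt (count + 1)
      (PySem.Set.add s (String.ofList (PySem.List.pyRepeat i.toList (count + 1))))
  else s
termination_by (cnt - count).toNat
decreasing_by omega

def set_gen (lst : List String) : List String :=
  let new_list : List String := PySem.Set.ofList lst
  let new_set : PySem.Set String := PySem.Set.ofList lst
  new_list.foldl (fun s i => set_gen_while i ((PySem.List.count lst i : Nat) : Int) 1 s) new_set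

-- ===== PORT B =====
-- 'if x in buckets: buckets[x].append(str(x) * (len(buckets[x]) + 2)) else: buckets[x] = []'
-- (buckets[x] is read with getD; the branch guarantees the key is present there)
def set_gen_alt_step (d : PySem.Dict String (List String)) (x : String) :
    PySem.Dict String (List String) :=
  if d.contains x then
    d.insert x (d.getD x [] ++
      [String.ofList (PySem.List.pyRepeat x.toList (((d.getD x []).length : Int) + 2))])
  else
    d.insert x []

def set_gen_alt (lst : List String) : List String :=
  let buckets : PySem.Dict String (List String) := lst.foldl set_gen_alt_step PySem.Dict.empty
  let result : PySem.Set String := PySem.Set.ofList buckets.keys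
  buckets.values.foldl (fun s chunk => PySem.Set.update s chunk) result

-- ===== PRECONDITION & SPEC =====
def Spec_set_gen (lst : List String) (out : List String) : Prop := out = set_gen_alt lst
instance (lst : List String) (out : List String) : Decidable (Spec_set_gen lst out) := by unfold Spec_set_gen; infer_instance

-- ===== CLAIM (what is proved, stated in full; the proofs are below) =====
def Claim_equal_set_gen : Prop := ∀ (lst : List String), Dom_set_gen lst → Spec_set_gen lst (set_gen lst)

-- ===== LEMMAS AND PROOFS =====

-- A's while-loop from 'count' up to 'cnt' adds exactly the repeats for k in range(count+1, cnt+1)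
theorem set_gen_while_eq_range (i : String) (cnt count : Int) (s : PySem.Set String) :
    set_gen_while i cnt count s =
      (PySem.List.pyRange (count + 1) (cnt + 1) 1).foldl
        (fun s k => PySem.Set.add s (String.ofList (PySem.List.pyRepeat i.toList k))) s := by
  by_cases h : count < cnt
  · rw [set_gen_while, dif_pos h, PySem.List.pyRange_one_cons (by omega : count + 1 < cnt + 1)]
    simpa using set_gen_while_eq_range i cnt (count + 1)
      (PySem.Set.add s (String.ofList (PySem.List.pyRepeat i.toList (count + 1))))
  · rw [set_gen_while, dif_neg h, PySem.List.pyRange_one_eq_nil (by omega : cnt + 1 ≤ count + 1)]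
    rfl
termination_by (cnt - count).toNat
decreasing_by omega

-- B's step applied once, written as a single insert (merging the two branches)
theorem set_gen_alt_step_apply (d : PySem.Dict String (List String)) (x : String) :
    set_gen_alt_step d x = d.insert x (if d.contains x then
        d.getD x [] ++
          [String.ofList (PySem.List.pyRepeat x.toList (((d.getD x []).length : Int) + 2))]
        else []) := by
  unfold set_gen_alt_step
  split_ifs <;> rfl

theorem set_gen_alt_keys (lst : List String) :
    (lst.foldl set_gen_alt_step PySem.Dict.empty).keys = PySem.Set.ofList lst := by
  rw [show set_gen_alt_step = fun (d : PySem.Dict String (List String)) x =>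
      d.insert x (if d.contains x then
        d.getD x [] ++
          [String.ofList (PySem.List.pyRepeat x.toList (((d.getD x []).length : Int) + 2))]
        else []) from funext₂ set_gen_alt_step_apply,
    PySem.Dict.keys_foldl_insert]
  simp [PySem.Set.update_nil_left]

theorem set_gen_alt_keys_nodup (lst : List String) :
    (lst.foldl set_gen_alt_step PySem.Dict.empty).keys.Nodup := by
  rw [set_gen_alt_keys]
  exact PySem.Set.nodup_ofList lst

-- the bucket of v after the streaming pass is exactly [v*2, ..., v*count(v)]
theorem set_gen_alt_bucket (lst : List String) (v : String) :
    (lst.foldl set_gen_alt_step PySem.Dict.empty).getD v [] =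
      (PySem.List.pyRange 2 ((lst.count v : Int) + 1) 1).map
        (fun k => String.ofList (PySem.List.pyRepeat v.toList k)) := by
  induction lst using List.reverseRecOn with
  | nil =>
    simp [PySem.Dict.getD_empty, PySem.List.pyRange_one_eq_nil (by omega : (1:Int) ≤ 2)]
  | append_singleton ys y ih =>
    have hcont : (ys.foldl set_gen_alt_step PySem.Dict.empty).contains y = decide (y ∈ ys) := by
      rw [PySem.Dict.contains_eq_decide_mem_keys, set_gen_alt_keys]
      simp [PySem.Set.mem_ofList]
    rw [List.foldl_append, List.foldl_cons, List.foldl_nil, set_gen_alt_step_apply,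
      PySem.Dict.getD_insert]
    by_cases hv : v = y
    · subst hv
      rw [if_pos rfl, hcont]
      by_cases hmem : v ∈ ys
      · have hc : 1 ≤ ys.count v := List.count_pos_iff.mpr hmem
        rw [if_pos (by simp [hmem]), ih, List.length_map, PySem.List.length_pyRange_one]
        have hlen : (((((ys.count v : Int) + 1 - 2).toNat : Nat) : Int) + 2)
            = (ys.count v : Int) + 1 := by omega
        rw [hlen]
        have hcnt : ((ys ++ [v]).count v : Int) = (ys.count v : Int) + 1 := by
          simp [List.count_append]
        rw [hcnt,
          PySem.List.pyRange_one_succ_right (by omega : (2:Int) ≤ (ys.count v : Int) + 1),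
          List.map_append, List.map_singleton]
      · have hc : ys.count v = 0 := List.count_eq_zero.mpr hmem
        rw [if_neg (by simp [hmem])]
        have hcnt : ((ys ++ [v]).count v : Int) = 1 := by simp [List.count_append, hc]
        rw [hcnt, PySem.List.pyRange_one_eq_nil (by omega : (1:Int) + 1 ≤ 2)]
        simp
    · rw [if_neg hv, ih]
      have hyv : ¬ y = v := fun h => hv h.symm
      have hcnt : (ys ++ [y]).count v = ys.count v := by
        simp [List.count_append, hyv]
      rw [hcnt]

-- ===== VERDICT (by name: the statement is the Claim_ definition above) =====
theorem set_gen_spec : Claim_equal_set_gen := by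
  intro lst _
  unfold Spec_set_gen set_gen set_gen_alt
  dsimp only
  rw [PySem.Set.ofList_eq_self_of_nodup _ (set_gen_alt_keys_nodup lst),
    PySem.Dict.values_eq_map_keys _ (set_gen_alt_keys_nodup lst) [],
    List.foldl_map, set_gen_alt_keys]
  apply PySem.List.foldl_congr_mem
  intro acc x _
  rw [set_gen_alt_bucket lst x]
  rw [show ∀ s : PySem.Set String, PySem.Set.update s
      ((PySem.List.pyRange 2 ((lst.count x : Int) + 1) 1).map
        (fun k => String.ofList (PySem.List.pyRepeat x.toList k)))
    = ((PySem.List.pyRange 2 ((lst.count x : Int) + 1) 1).map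
        (fun k => String.ofList (PySem.List.pyRepeat x.toList k))).foldl PySem.Set.add s
    from fun s => rfl,
    List.foldl_map]
  simpa [PySem.List.count] using set_gen_while_eq_range x ((lst.count x : Nat) : Int) 1 acc
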